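-- pv_equiv track=rewrite | github.com/judsonp/advent-of-code-2025 | day01/main.py | part_two
-- ===== SOURCE A (Python) =====
-- from typing import List
--
-- def parse(data: List[str]) -> List[int]:
--     split_data = [(x[:1], x[1:]) for x in data]
--     return [
--         int(amount) if direction == "R" else -int(amount)
--         for (direction, amount) in split_data
--     ]
--
-- def part_two(data: List[str]) -> int:
--     turns = parse(data)
--     dial = 50
--     password = 0
--     for turn in turns:
--         # If we start from zero and turn left, divmod will produce 1 just to get the
--         # dial positive again, even though we didn't cross zero.
--         # In this case, adjust the starting dial position to 100 (which is the same mod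
--         # 100) so that we don't count this one.
--         if dial == 0 and turn < 0:
--             dial = 100
--
--         password_delta, dial = divmod(dial + turn, 100)
--         password_delta = abs(password_delta)
--
--         # If we turn left and land on exactly zero, divmod won't notice, but it counts.
--         # If we turned right, it will have already counted it.
--         if turn < 0 and dial == 0:
--             password_delta += 1
--
--         password += password_delta
--     return password
-- ===== SOURCE B (Python) =====
-- def part_two(data):
--     # Unbounded absolute position; count multiples of 100 crossed per turn
--     # (half-open on the leaving side, closed on the landing side).
--     pos = 50
--     password = 0
--     for s in data:
--         amount = int(s[1:])
--         t = amount if s[:1] == "R" else -amount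
--         new = pos + t
--         if t > 0:
--             password += new // 100 - pos // 100
--         elif t < 0:
--             password += (new // -100) - (pos // -100)
--         pos = new
--     return password
-- ===== Notes on version B (the rewrite author's own statement) =====
-- stated objective: alternative
-- what changed: B drops A's mod-100 dial simulation (divmod, the 0→100 reset and the land-on-zero +1 correction) and instead keeps an unbounded running position, counting crossed multiples of 100 per turn as a floor-quotient difference when turning right and a ceiling-quotient difference when turning left.
import Mathlib
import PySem

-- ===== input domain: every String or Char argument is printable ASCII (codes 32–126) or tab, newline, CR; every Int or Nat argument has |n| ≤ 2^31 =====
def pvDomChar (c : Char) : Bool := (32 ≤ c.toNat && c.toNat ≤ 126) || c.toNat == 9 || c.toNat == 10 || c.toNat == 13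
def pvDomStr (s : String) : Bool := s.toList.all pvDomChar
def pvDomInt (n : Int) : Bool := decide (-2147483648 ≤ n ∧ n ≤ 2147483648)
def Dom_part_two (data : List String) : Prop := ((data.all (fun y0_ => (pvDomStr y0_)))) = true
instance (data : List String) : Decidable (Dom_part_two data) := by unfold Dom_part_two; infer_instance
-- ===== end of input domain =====

-- B replaces A's mod-100 dial simulation (divmod with 0→100 reset and a landing-on-zero
-- +1 fix) by an unbounded running position, counting crossed multiples of 100 with
-- floor/ceil differences; same cost, alternative algorithm.

-- ===== PORT A =====
def part_two_parse (data : List String) : Option (List Int) :=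
  data.mapM (fun x =>
    (PySem.Int.ofStr? (PySem.Str.slice x (some 1) none)).map
      (fun n => if PySem.Str.slice x none (some 1) = "R" then n else -n))

def part_two_step (st : Int × Int) (turn : Int) : Int × Int :=
  let dial := if st.1 = 0 ∧ turn < 0 then (100 : Int) else st.1
  let q := PySem.Int.floordiv (dial + turn) 100
  let dial' := PySem.Int.mod (dial + turn) 100
  let delta := if turn < 0 ∧ dial' = 0 then |q| + 1 else |q|
  (dial', st.2 + delta)

def part_two (data : List String) : Int :=
  match part_two_parse data with
  | none => 0   -- Python raises ValueError here; excluded by Pre_part_two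
  | some turns => (turns.foldl part_two_step (50, 0)).2

-- ===== PORT B =====
def part_two_alt_step (st : Int × Int) (s : String) : Int × Int :=
  let amount := (PySem.Int.ofStr? (PySem.Str.slice s (some 1) none)).getD 0
  let t := if PySem.Str.slice s none (some 1) = "R" then amount else -amount
  let newPos := st.1 + t
  let pw :=
    if t > 0 then st.2 + (PySem.Int.floordiv newPos 100 - PySem.Int.floordiv st.1 100)
    else if t < 0 then st.2 + (PySem.Int.floordiv newPos (-100) - PySem.Int.floordiv st.1 (-100))
    else st.2
  (newPos, pw)

def part_two_alt (data : List String) : Int :=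
  (data.foldl part_two_alt_step (50, 0)).2

-- ===== PRECONDITION & SPEC =====
-- Pre_: every string's tail must parse as a Python int; otherwise A raises ValueError.
def Pre_part_two (data : List String) : Prop :=
  (data.all (fun s => (PySem.Int.ofChars? (s.toList.drop 1)).isSome)) = true
instance (data : List String) : Decidable (Pre_part_two data) := by
  unfold Pre_part_two; infer_instance

def pvWitness_part_two : List String := (["R100", "R150", "R49", "R1"])

def Spec_part_two (data : List String) (out : Int) : Prop := out = part_two_alt data
instance (data : List String) (out : Int) : Decidable (Spec_part_two data out) := by
  unfold Spec_part_two; infer_instance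

-- ===== CLAIM (what is proved, stated in full; the proofs are below) =====
def Claim_equal_part_two : Prop :=
  ∀ (data : List String), Dom_part_two data → Pre_part_two data →
    Spec_part_two data (part_two data)

-- ===== LEMMAS AND PROOFS =====

/-- The signed turn both programs extract from a string (under Pre_ the `getD 0`
is the parsed value). -/
def pvTurn (s : String) : Int :=
  let amount := (PySem.Int.ofStr? (PySem.Str.slice s (some 1) none)).getD 0
  if PySem.Str.slice s none (some 1) = "R" then amount else -amount

lemma pvSliceBridge (s : String) :
    PySem.Int.ofStr? (PySem.Str.slice s (some 1) none) = PySem.Int.ofChars? (s.toList.drop 1) := by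
  simp [PySem.Int.ofStr?, PySem.Str.slice, PySem.List.slice_from_one]

lemma pvParse_eq (data : List String) (h : Pre_part_two data) :
    part_two_parse data = some (data.map pvTurn) := by
  induction data with
  | nil => rfl
  | cons s rest ih =>
    unfold Pre_part_two at h
    simp only [List.all_cons, Bool.and_eq_true] at h
    obtain ⟨hs, hrest⟩ := h
    rw [← pvSliceBridge] at hs
    obtain ⟨n, hn⟩ := Option.isSome_iff_exists.mp hs
    have hr := ih hrest
    unfold part_two_parse at hr ⊢
    simp [List.mapM_cons, hn, hr, pvTurn]

lemma pvFloordiv_pos (a : Int) : PySem.Int.floordiv a 100 = a / 100 :=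
  PySem.Int.floordiv_eq_ediv_of_pos (by norm_num)

lemma pvMod_pos (a : Int) : PySem.Int.mod a 100 = a % 100 :=
  PySem.Int.mod_eq_emod_of_pos (by norm_num)

lemma pvFloordiv_neg (a : Int) : PySem.Int.floordiv a (-100) = (-a) / 100 := by
  have h := PySem.Int.floordiv_mul_add_mod a (-100)
  have hb := PySem.Int.mod_neg_bounds (a := a) (b := -100) (by norm_num)
  omega

lemma pvStepAgree (pos pw : Int) (s : String) :
    part_two_step (PySem.Int.mod pos 100, pw) (pvTurn s)
      = (PySem.Int.mod ((part_two_alt_step (pos, pw) s).1) 100,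
         (part_two_alt_step (pos, pw) s).2) := by
  simp only [part_two_step, part_two_alt_step, pvTurn]
  generalize (if PySem.Str.slice s none (some 1) = "R"
      then (PySem.Int.ofStr? (PySem.Str.slice s (some 1) none)).getD 0
      else -(PySem.Int.ofStr? (PySem.Str.slice s (some 1) none)).getD 0) = t
  simp only [pvFloordiv_pos, pvMod_pos, pvFloordiv_neg, Int.abs_eq_natAbs]
  split_ifs <;> simp only [Prod.mk.injEq] <;> constructor <;> omega

lemma pvLoop (data : List String) : ∀ pos pw : Int,
    ((data.map pvTurn).foldl part_two_step (PySem.Int.mod pos 100, pw)).2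
      = (data.foldl part_two_alt_step (pos, pw)).2 := by
  induction data with
  | nil => intro pos pw; rfl
  | cons s rest ih =>
    intro pos pw
    simp only [List.map_cons, List.foldl_cons, pvStepAgree]
    have := ih (part_two_alt_step (pos, pw) s).1 (part_two_alt_step (pos, pw) s).2
    simpa using this

-- ===== VERDICT (by name: the statement is the Claim_ definition above) =====
theorem part_two_spec : Claim_equal_part_two := by
  intro data _ hpre
  unfold Spec_part_two part_two part_two_alt
  rw [pvParse_eq data hpre]
  have h50 : (50 : Int) = PySem.Int.mod 50 100 := by decide
  calc ((data.map pvTurn).foldl part_two_step (50, 0)).2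
      = ((data.map pvTurn).foldl part_two_step (PySem.Int.mod 50 100, 0)).2 := by rw [← h50]
    _ = (data.foldl part_two_alt_step (50, 0)).2 := pvLoop data 50 0
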